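-- pv_equiv track=rewrite | github.com/pypi-data/pypi-mirror-348 | packages/arc-memory/arc_memory-0.7.1-py3-none-any.whl/arc_memory/sdk/decision_trail.py | _extract_rationale
-- ===== SOURCE A (Python) =====
-- from typing import Any, Dict, List, Optional
--
-- def _extract_rationale(node: Dict[str, Any]) -> Optional[str]:
--     """Extract a decision rationale from a node.
--
--     This function attempts to extract a rationale from the node's body or properties.
--     It looks for keywords like "because", "reason", "rationale", etc.
--
--     Args:
--         node: The node to extract a rationale from.
--
--     Returns:
--         The extracted rationale, or None if no rationale could be extracted.
--     """
--     # This is a simplified implementation that would be enhanced in a real system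
--     body = node.get("body", "")
--     if not body:
--         return None
--
--     # Look for common rationale indicators
--     rationale_indicators = [
--         "because", "reason", "rationale", "due to", "in order to",
--         "to fix", "to address", "to resolve", "to implement"
--     ]
--
--     for indicator in rationale_indicators:
--         if indicator in body.lower():
--             # Find the sentence containing the indicator
--             sentences = body.split(". ")
--             for sentence in sentences:
--                 if indicator in sentence.lower():
--                     return sentence.strip()
--
--     # If no specific rationale found, return the first sentence as a fallback
--     sentences = body.split(". ")
--     if sentences:
--         return sentences[0].strip()
--
--     return None
-- ===== SOURCE B (Python) =====
-- from typing import Any, Dict, List, Optional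
--
--
-- def _extract_rationale(node: Dict[str, Any]) -> Optional[str]:
--     """Extract a decision rationale from a node (index-build re-implementation).
--
--     One pass over the sentences builds a map from each indicator to the first
--     sentence containing it; then the indicators are consulted in priority order.
--     """
--     body = node.get("body", "")
--     if not body:
--         return None
--
--     rationale_indicators = [
--         "because", "reason", "rationale", "due to", "in order to",
--         "to fix", "to address", "to resolve", "to implement"
--     ]
--
--     sentences = body.split(". ")
--     first_hit = {}
--     for sentence in sentences:
--         low = sentence.lower()
--         for indicator in rationale_indicators:
--             if indicator not in first_hit and indicator in low:
--                 first_hit[indicator] = sentence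
--
--     for indicator in rationale_indicators:
--         if indicator in first_hit:
--             return first_hit[indicator].strip()
--
--     return sentences[0].strip()
-- ===== Notes on version B (the rewrite author's own statement) =====
-- stated objective: alternative
-- what changed: A rescans the sentence list once per matching indicator (and re-splits the body each time); B makes a single pass over the sentences building a dict from each indicator to the first sentence containing it, then resolves the indicators by priority with dict lookups.
import Mathlib
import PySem

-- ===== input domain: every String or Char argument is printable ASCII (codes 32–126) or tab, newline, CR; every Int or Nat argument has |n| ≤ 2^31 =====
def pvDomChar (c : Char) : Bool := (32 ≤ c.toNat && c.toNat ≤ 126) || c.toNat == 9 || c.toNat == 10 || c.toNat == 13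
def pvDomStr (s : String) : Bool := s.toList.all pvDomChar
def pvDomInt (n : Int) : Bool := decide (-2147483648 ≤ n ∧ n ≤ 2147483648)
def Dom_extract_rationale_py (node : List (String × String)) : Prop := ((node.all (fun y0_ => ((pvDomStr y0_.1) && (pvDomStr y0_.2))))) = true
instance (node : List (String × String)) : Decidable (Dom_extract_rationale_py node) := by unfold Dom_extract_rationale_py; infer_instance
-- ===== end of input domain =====

-- B replaces A's per-indicator rescans of the sentence list by one pass that indexes the first
-- matching sentence per indicator in a dict, then a priority lookup (alternative decomposition,
-- same results).

-- shared context: `node.get("body", "")` (first-match association lookup) and the literal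
-- indicator list both Pythons contain
def pvGetBody : List (String × String) → String
  | [] => ""
  | (k, v) :: rest => if k == "body" then v else pvGetBody rest

def pvIndicators : List String :=
  ["because", "reason", "rationale", "due to", "in order to",
   "to fix", "to address", "to resolve", "to implement"]

-- ===== PORT A =====
-- inner `for sentence in sentences: if indicator in sentence.lower(): return sentence.strip()`
def aFindSentence (ind : String) : List String → Option String
  | [] => none
  | s :: rest =>
    if PySem.Str.isIn ind (PySem.Str.lower s) then some (PySem.Str.strip s)
    else aFindSentence ind rest

-- outer `for indicator in rationale_indicators: if indicator in body.lower(): …`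
-- (A recomputes `sentences = body.split(". ")` inside each iteration, as the Python does)
def aScan (body : String) : List String → Option String
  | [] => none
  | ind :: rest =>
    if PySem.Str.isIn ind (PySem.Str.lower body) then
      match aFindSentence ind ((PySem.Str.split? body ". ").getD []) with
      | some r => some r
      | none => aScan body rest
    else aScan body rest

def extract_rationale_py (node : List (String × String)) : Option String :=
  let body := pvGetBody node
  if body == "" then none
  else
    match aScan body pvIndicators with
    | some r => some r
    | none =>
      match (PySem.Str.split? body ". ").getD [] with
      | [] => none
      | s0 :: _ => some (PySem.Str.strip s0)

-- ===== PORT B =====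
-- one sentence: `for indicator in …: if indicator not in first_hit and indicator in low: first_hit[indicator] = sentence`
def bStep (d : PySem.Dict String String) (s : String) : PySem.Dict String String :=
  let low := PySem.Str.lower s
  pvIndicators.foldl
    (fun d ind => if (!d.contains ind) && PySem.Str.isIn ind low then d.insert ind s else d) d

-- the single pass over the sentences building `first_hit`
def bBuild (sentences : List String) : PySem.Dict String String :=
  sentences.foldl bStep PySem.Dict.empty

-- `for indicator in …: if indicator in first_hit: return first_hit[indicator].strip()`
def bLookup (d : PySem.Dict String String) : List String → Option String
  | [] => none
  | ind :: rest =>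
    match d.get? ind with
    | some s => some (PySem.Str.strip s)
    | none => bLookup d rest

def extract_rationale_py_alt (node : List (String × String)) : Option String :=
  let body := pvGetBody node
  if body == "" then none
  else
    let sentences := (PySem.Str.split? body ". ").getD []
    match bLookup (bBuild sentences) pvIndicators with
    | some r => some r
    | none => (PySem.List.pyGet? sentences 0).map PySem.Str.strip

-- ===== PRECONDITION & SPEC =====
def Spec_extract_rationale_py (node : List (String × String)) (out : Option String) : Prop := out = extract_rationale_py_alt node
instance (node : List (String × String)) (out : Option String) : Decidable (Spec_extract_rationale_py node out) := by unfold Spec_extract_rationale_py; infer_instance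

-- ===== CLAIM (what is proved, stated in full; the proofs are below) =====
def Claim_equal_extract_rationale_py : Prop := ∀ (node : List (String × String)), Dom_extract_rationale_py node → Spec_extract_rationale_py node (extract_rationale_py node)

-- ===== LEMMAS AND PROOFS =====

-- every piece produced by Python's `body.split(sep)` is a contiguous substring of `body`
theorem pv_go_infix (sep : List Char) (fuel : Nat) (l cur : List Char) (acc : List (List Char)) (x : List Char)
    (hx : x ∈ PySem.Chars.splitOn.go sep fuel l cur acc) : x ∈ acc ∨ x <:+: (cur.reverse ++ l) := by
  induction fuel generalizing l cur acc with
  | zero =>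
    simp only [PySem.Chars.splitOn.go, List.mem_reverse, List.mem_cons] at hx
    rcases hx with h | h
    · exact Or.inr (h ▸ List.infix_rfl)
    · exact Or.inl h
  | succ n ih =>
    cases l with
    | nil =>
      simp only [PySem.Chars.splitOn.go, List.mem_reverse, List.mem_cons] at hx
      rcases hx with h | h
      · subst h; exact Or.inr ⟨[], [], by simp⟩
      · exact Or.inl h
    | cons c rest =>
      rw [PySem.Chars.splitOn.go] at hx
      split at hx
      · rcases ih _ _ _ hx with h | h
        · rcases List.mem_cons.mp h with h' | h'
          · exact Or.inr (h' ▸ ⟨[], c :: rest, by simp⟩)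
          · exact Or.inl h'
        · refine Or.inr (h.trans ?_)
          simp only [List.reverse_nil, List.nil_append]
          exact (List.drop_suffix _ _).isInfix.trans ⟨cur.reverse, [], by simp⟩
      · rcases ih _ _ _ hx with h | h
        · exact Or.inl h
        · refine Or.inr ?_
          simpa using h

theorem pv_mem_splitOn_infix {s sep x : List Char} (hx : x ∈ PySem.Chars.splitOn s sep) : x <:+: s := by
  have := pv_go_infix sep (s.length + 1) s [] [] x hx
  simpa using this

-- an indicator found in a sentence of body.split(". ") is found in body (A's outer gate)
theorem pv_gate (body s ind : String)
    (hs : s ∈ (PySem.Str.split? body ". ").getD [])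
    (h : PySem.Str.isIn ind (PySem.Str.lower s) = true) :
    PySem.Str.isIn ind (PySem.Str.lower body) = true := by
  simp only [PySem.Str.split?, PySem.Chars.split?, List.isEmpty_iff, String.toList] at hs
  rw [if_neg (by decide)] at hs
  simp only [Option.map_some, Option.getD_some, List.mem_map] at hs
  rcases hs with ⟨cs, hcs, rfl⟩
  have hinf : cs <:+: body.toList := pv_mem_splitOn_infix hcs
  rw [PySem.Str.isIn_eq, PySem.Str.toList_lower] at h ⊢
  rw [PySem.Chars.isIn_iff_infix] at h ⊢
  refine h.trans ?_
  simp only [String.toList_ofList]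
  simpa [PySem.Chars.lower] using List.IsInfix.map PySem.Chars.lowerChar hinf

-- A's inner loop is find?-then-strip
theorem pv_aFindSentence_eq (ind : String) (ss : List String) :
    aFindSentence ind ss
      = (ss.find? (fun s => PySem.Str.isIn ind (PySem.Str.lower s))).map PySem.Str.strip := by
  induction ss with
  | nil => rfl
  | cons s rest ih =>
    cases h : PySem.Chars.isIn ind.toList (PySem.Chars.lower s.toList) <;>
      simp [aFindSentence, h, ih]

-- the fold inside bStep never touches keys it does not iterate over
theorem pv_foldIns_get?_not_mem (low s : String) (J : List String) (ind : String) (h : ind ∉ J)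
    (d : PySem.Dict String String) :
    (J.foldl (fun d i => if (!d.contains i) && PySem.Str.isIn i low then d.insert i s else d) d).get? ind
      = d.get? ind := by
  induction J generalizing d with
  | nil => rfl
  | cons j J' ih =>
    simp only [List.mem_cons, not_or] at h
    simp only [List.foldl_cons]
    rw [ih h.2]
    split
    · exact PySem.Dict.get?_insert_of_ne _ _ h.1
    · rfl

-- effect of one bStep fold on a key it does iterate over
theorem pv_foldIns_get?_mem (low s : String) (J : List String) (ind : String) (hmem : ind ∈ J)
    (hnd : J.Nodup) (d : PySem.Dict String String) :
    (J.foldl (fun d i => if (!d.contains i) && PySem.Str.isIn i low then d.insert i s else d) d).get? ind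
      = if (!d.contains ind) && PySem.Str.isIn ind low then some s else d.get? ind := by
  induction J generalizing d with
  | nil => exact absurd hmem (List.not_mem_nil)
  | cons j J' ih =>
    simp only [List.foldl_cons]
    by_cases hij : ind = j
    · subst hij
      have hnot : ind ∉ J' := (List.nodup_cons.mp hnd).1
      rw [pv_foldIns_get?_not_mem low s J' ind hnot]
      split
      · exact PySem.Dict.get?_insert_self _ _ _
      · rfl
    · have hmem' : ind ∈ J' := (List.mem_cons.mp hmem).resolve_left hij
      have hnd' : J'.Nodup := (List.nodup_cons.mp hnd).2
      rw [ih hmem' hnd']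
      have hget : (if (!d.contains j) && PySem.Str.isIn j low then d.insert j s else d).get? ind
          = d.get? ind := by
        split
        · exact PySem.Dict.get?_insert_of_ne _ _ hij
        · rfl
      have hcon : (if (!d.contains j) && PySem.Str.isIn j low then d.insert j s else d).contains ind
          = d.contains ind := by
        split
        · rw [PySem.Dict.contains_insert]
          simp [hij]
        · rfl
      rw [hget, hcon]

theorem pv_nodup_indicators : pvIndicators.Nodup := by decide

-- the dict built by B holds, per indicator, the first sentence containing it
theorem pv_get?_bBuild (ss : List String) (ind : String) (hind : ind ∈ pvIndicators)
    (d : PySem.Dict String String) :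
    (ss.foldl bStep d).get? ind
      = (d.get? ind).or (ss.find? (fun s => PySem.Str.isIn ind (PySem.Str.lower s))) := by
  induction ss generalizing d with
  | nil => simp
  | cons s rest ih =>
    simp only [List.foldl_cons]
    rw [ih]
    have hstep : (bStep d s).get? ind
        = if (!d.contains ind) && PySem.Str.isIn ind (PySem.Str.lower s) then some s
          else d.get? ind := by
      simp only [bStep]
      exact pv_foldIns_get?_mem (PySem.Str.lower s) s pvIndicators ind hind pv_nodup_indicators d
    rw [hstep, List.find?_cons]
    cases hd : d.get? ind with
    | some v =>
      have hc : d.contains ind = true := by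
        cases hc : d.contains ind
        · rw [← PySem.Dict.get?_eq_none_iff_contains] at hc
          rw [hd] at hc; exact absurd hc (by simp)
        · rfl
      simp [hc]
    | none =>
      have hc : d.contains ind = false := (PySem.Dict.get?_eq_none_iff_contains d ind).mp hd
      cases hp : PySem.Str.isIn ind (PySem.Str.lower s) with
      | true => simp_all
      | false => simp_all

-- the two loops over the indicator list agree
theorem pv_scan_eq (body : String) (J : List String) (hJ : ∀ i ∈ J, i ∈ pvIndicators) :
    aScan body J = bLookup (bBuild ((PySem.Str.split? body ". ").getD [])) J := by
  induction J with
  | nil => rfl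
  | cons ind rest ih =>
    have hind : ind ∈ pvIndicators := hJ ind (List.mem_cons_self)
    have ih' := ih (fun i hi => hJ i (List.mem_cons_of_mem _ hi))
    have hb : (bBuild ((PySem.Str.split? body ". ").getD [])).get? ind
        = ((PySem.Str.split? body ". ").getD []).find?
            (fun s => PySem.Str.isIn ind (PySem.Str.lower s)) := by
      unfold bBuild
      rw [pv_get?_bBuild _ ind hind]
      simp [PySem.Dict.get?_empty]
    cases hf : (bBuild ((PySem.Str.split? body ". ").getD [])).get? ind with
    | none =>
      have hfind := hb.symm.trans hf
      simp only [aScan, bLookup, pv_aFindSentence_eq, hfind, hf, Option.map_none]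
      split <;> exact ih'
    | some s =>
      have hfind := hb.symm.trans hf
      have hp : PySem.Str.isIn ind (PySem.Str.lower s) = true := by
        have := List.find?_some hfind; simpa using this
      have hmem : s ∈ (PySem.Str.split? body ". ").getD [] := List.mem_of_find?_eq_some hfind
      have hgate := pv_gate body s ind hmem hp
      simp only [aScan, bLookup, pv_aFindSentence_eq, hfind, hf, hgate, if_true, Option.map_some]

-- ===== VERDICT (by name: the statement is the Claim_ definition above) =====
theorem extract_rationale_py_spec : Claim_equal_extract_rationale_py := by
  intro node _
  unfold Spec_extract_rationale_py extract_rationale_py extract_rationale_py_alt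
  by_cases hb : pvGetBody node == ""
  · simp [hb]
  · simp only [hb, Bool.false_eq_true, if_false]
    rw [← pv_scan_eq (pvGetBody node) pvIndicators (fun i hi => hi)]
    cases aScan (pvGetBody node) pvIndicators with
    | some r => rfl
    | none =>
      cases hs : (PySem.Str.split? (pvGetBody node) ". ").getD [] with
      | nil => simp [PySem.List.pyGet?]
      | cons s0 tail => simp [PySem.List.pyGet?, PySem.List.pyIdx?]
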